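-- pv_equiv track=rewrite | github.com/nnamnielk/upside2-ipy | condiv/condiv2.py | gen_swap_set
-- ===== SOURCE A (Python) =====
-- def gen_swap_set(st, n_rep):
--     a = ""
--     for i in range(st, n_rep - 1, 2):
--         a += '{}-{},'.format(i, i + 1)
--     b = ""
--     for i in range(st + 1, n_rep - 1, 2):
--         b += '{}-{},'.format(i, i + 1)
--     return a[:-1], b[:-1]
-- ===== SOURCE B (Python) =====
-- def gen_swap_set(st, n_rep):
--     first = []
--     second = []
--     for i in range(st, n_rep - 1):
--         piece = '{}-{}'.format(i, i + 1)
--         if (i - st) % 2 == 0: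
--             first.append(piece)
--         else:
--             second.append(piece)
--     return ','.join(first), ','.join(second)
-- ===== Notes on version B (the rewrite author's own statement) =====
-- stated objective: alternative
-- what changed: Replaces A's two separate step-2 range scans (each concatenating 'i-(i+1),' into a string and chopping the trailing comma with [:-1]) by one step-1 pass that partitions the 'i-(i+1)' pieces into two lists by parity of (i - st) and ','-joins each.
import Mathlib
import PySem

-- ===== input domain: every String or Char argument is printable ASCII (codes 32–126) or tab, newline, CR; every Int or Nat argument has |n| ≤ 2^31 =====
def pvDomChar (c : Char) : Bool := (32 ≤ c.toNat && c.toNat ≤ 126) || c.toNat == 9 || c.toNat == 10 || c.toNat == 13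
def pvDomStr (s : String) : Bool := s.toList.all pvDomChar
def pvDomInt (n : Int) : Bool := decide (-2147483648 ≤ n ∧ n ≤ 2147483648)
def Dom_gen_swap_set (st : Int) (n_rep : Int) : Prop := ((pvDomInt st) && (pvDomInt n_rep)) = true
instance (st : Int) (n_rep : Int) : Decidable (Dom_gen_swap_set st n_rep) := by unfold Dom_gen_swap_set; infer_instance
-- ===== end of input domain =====

-- B replaces A's two step-2 scans (concatenating "i-(i+1)," and chopping the last comma)
-- by a single step-1 pass that partitions the pieces by parity of (i - st) and joins with ','.

-- ===== PORT A =====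
-- '{}-{},'.format(i, i + 1)
def pvPieceComma (i : Int) : List Char :=
  PySem.Int.toChars i ++ ['-'] ++ PySem.Int.toChars (i + 1) ++ [',']

def gen_swap_set (st : Int) (n_rep : Int) : String × String :=
  let a := (PySem.List.pyRange st (n_rep - 1) 2).foldl (fun acc i => acc ++ pvPieceComma i) ([] : List Char)
  let b := (PySem.List.pyRange (st + 1) (n_rep - 1) 2).foldl (fun acc i => acc ++ pvPieceComma i) ([] : List Char)
  (String.ofList (PySem.List.slice a none (some (-1))),
   String.ofList (PySem.List.slice b none (some (-1))))

-- ===== PORT B =====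
-- '{}-{}'.format(i, i + 1)
def pvPiece (i : Int) : List Char :=
  PySem.Int.toChars i ++ ['-'] ++ PySem.Int.toChars (i + 1)

def gen_swap_set_alt (st : Int) (n_rep : Int) : String × String :=
  let pr := (PySem.List.pyRange st (n_rep - 1) 1).foldl
    (fun (acc : List (List Char) × List (List Char)) i =>
      if PySem.Int.mod (i - st) 2 = 0 then (acc.1 ++ [pvPiece i], acc.2)
      else (acc.1, acc.2 ++ [pvPiece i]))
    (([], []) : List (List Char) × List (List Char))
  (String.ofList (PySem.Chars.join [','] pr.1),
   String.ofList (PySem.Chars.join [','] pr.2))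

-- ===== PRECONDITION & SPEC =====
def Spec_gen_swap_set (st : Int) (n_rep : Int) (out : String × String) : Prop := out = gen_swap_set_alt st n_rep
instance (st : Int) (n_rep : Int) (out : String × String) : Decidable (Spec_gen_swap_set st n_rep out) := by unfold Spec_gen_swap_set; infer_instance

-- ===== CLAIM (what is proved, stated in full; the proofs are below) =====
def Claim_equal_gen_swap_set : Prop := ∀ (st : Int) (n_rep : Int), Dom_gen_swap_set st n_rep → Spec_gen_swap_set st n_rep (gen_swap_set st n_rep)

-- ===== LEMMAS AND PROOFS =====

-- parity of (i - a) flips when the base moves by one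
lemma pvModFlip (a i : Int) : (PySem.Int.mod (i - a) 2 = 0) ↔ ¬ (PySem.Int.mod (i - (a + 1)) 2 = 0) := by
  rw [PySem.Int.mod_eq_zero_iff_dvd, PySem.Int.mod_eq_zero_iff_dvd]
  omega

lemma pvRangeTwoNil (a e : Int) (h : e ≤ a) : PySem.List.pyRange a e 2 = [] := by
  rw [PySem.List.pyRange_of_pos a e (by norm_num)]
  rw [if_neg (by omega)]
  simp

lemma pvRangeTwoCons (a e : Int) (h : a < e) : PySem.List.pyRange a e 2 = a :: PySem.List.pyRange (a + 2) e 2 := by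
  rw [PySem.List.pyRange_of_pos a e (by norm_num), PySem.List.pyRange_of_pos (a + 2) e (by norm_num)]
  rw [if_pos h]
  by_cases h2 : a + 2 < e
  · rw [if_pos h2]
    have hn : ((e - a + 2 - 1) / 2).toNat = ((e - (a + 2) + 2 - 1) / 2).toNat + 1 := by omega
    rw [hn, List.range_succ_eq_map]
    simp only [List.map_cons, List.map_map]
    congr 1
    · push_cast
      ring
    · apply List.map_congr_left
      intro k _
      simp only [Function.comp_apply]
      push_cast
      ring
  · rw [if_neg h2]
    have hn : ((e - a + 2 - 1) / 2).toNat = 1 := by omega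
    rw [hn]
    simp

-- the step-1 range split by parity of (i - a) is the two step-2 ranges
lemma pvRangeParity (n : Nat) : ∀ a e : Int, (e - a).toNat = n →
    ((PySem.List.pyRange a e 1).filter (fun i => decide (PySem.Int.mod (i - a) 2 = 0)) = PySem.List.pyRange a e 2 ∧
     (PySem.List.pyRange a e 1).filter (fun i => ! decide (PySem.Int.mod (i - a) 2 = 0)) = PySem.List.pyRange (a + 1) e 2) := by
  induction n with
  | zero =>
    intro a e h
    have he : e ≤ a := by omega
    rw [PySem.List.pyRange_one_eq_nil he, pvRangeTwoNil a e he, pvRangeTwoNil (a + 1) e (by omega)]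
    simp
  | succ m ih =>
    intro a e h
    have hlt : a < e := by omega
    have ih' := ih (a + 1) e (by omega)
    have hflip : ∀ i : Int, (decide (PySem.Int.mod (i - a) 2 = 0)) = ! decide (PySem.Int.mod (i - (a + 1)) 2 = 0) := by
      intro i
      by_cases hd : PySem.Int.mod (i - a) 2 = 0
      · rw [decide_eq_true hd, decide_eq_false ((pvModFlip a i).mp hd)]
        rfl
      · rw [decide_eq_false hd, decide_eq_true (by
          by_contra hq
          exact hd ((pvModFlip a i).mpr hq))]
        rfl
    rw [PySem.List.pyRange_one_cons hlt]
    have h0 : decide (PySem.Int.mod (a - a) 2 = 0) = true := by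
      rw [sub_self]
      decide
    constructor
    · rw [List.filter_cons, h0, if_pos rfl]
      rw [List.filter_congr (fun i _ => hflip i)]
      rw [ih'.2, pvRangeTwoCons a e hlt]
      have h11 : a + 1 + 1 = a + 2 := by ring
      rw [h11]
    · rw [List.filter_cons, h0, Bool.not_true, if_neg Bool.false_ne_true]
      have hflip' : ∀ i : Int, (! decide (PySem.Int.mod (i - a) 2 = 0)) = decide (PySem.Int.mod (i - (a + 1)) 2 = 0) := by
        intro i
        rw [hflip i, Bool.not_not]
      rw [List.filter_congr (fun i _ => hflip' i)]
      exact ih'.1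

-- dropping the last char of concatenated "piece," blocks is the ','-join of the pieces
lemma pvDropLastJoin : ∀ l : List (List Char),
    ((l.map (fun p => p ++ [','])).flatten).dropLast = PySem.Chars.join [','] l := by
  intro l
  induction l with
  | nil => simp [PySem.Chars.join_nil]
  | cons x t ih =>
    cases t with
    | nil => simp [PySem.Chars.join_singleton]
    | cons y s =>
      rw [List.map_cons, List.flatten_cons, PySem.Chars.join_cons_cons]
      rw [List.dropLast_append_of_ne_nil (by simp)]
      rw [ih]

lemma pvSideA (pieces : List Int) :
    PySem.List.slice (pieces.foldl (fun acc i => acc ++ pvPieceComma i) ([] : List Char)) none (some (-1))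
      = PySem.Chars.join [','] (pieces.map pvPiece) := by
  rw [PySem.List.foldl_append_eq_flatMap]
  rw [PySem.List.slice_to_neg_one]
  have : pieces.flatMap pvPieceComma = ((pieces.map pvPiece).map (fun p => p ++ [','])).flatten := by
    rw [List.map_map, List.flatMap_def]
    rfl
  rw [List.nil_append, this]
  exact pvDropLastJoin _

-- ===== VERDICT (by name: the statement is the Claim_ definition above) =====
theorem gen_swap_set_spec : Claim_equal_gen_swap_set := by
  intro st n_rep _
  unfold Spec_gen_swap_set
  simp only [gen_swap_set, gen_swap_set_alt]
  have hsplit := pvRangeParity (n_rep - 1 - st).toNat st (n_rep - 1) rfl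
  -- B's single loop is two independent accumulators
  have hB : (PySem.List.pyRange st (n_rep - 1) 1).foldl
      (fun (acc : List (List Char) × List (List Char)) i =>
        if PySem.Int.mod (i - st) 2 = 0 then (acc.1 ++ [pvPiece i], acc.2)
        else (acc.1, acc.2 ++ [pvPiece i]))
      (([], []) : List (List Char) × List (List Char))
      = ((PySem.List.pyRange st (n_rep - 1) 2).map pvPiece,
         (PySem.List.pyRange (st + 1) (n_rep - 1) 2).map pvPiece) := by
    have hstep : (PySem.List.pyRange st (n_rep - 1) 1).foldl
        (fun (acc : List (List Char) × List (List Char)) i =>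
          if PySem.Int.mod (i - st) 2 = 0 then (acc.1 ++ [pvPiece i], acc.2)
          else (acc.1, acc.2 ++ [pvPiece i]))
        (([], []) : List (List Char) × List (List Char))
        = (PySem.List.pyRange st (n_rep - 1) 1).foldl
        (fun (acc : List (List Char) × List (List Char)) i =>
          ((fun (u : List (List Char)) i => if decide (PySem.Int.mod (i - st) 2 = 0) then u ++ [pvPiece i] else u) acc.1 i,
           (fun (v : List (List Char)) i => if ! decide (PySem.Int.mod (i - st) 2 = 0) then v ++ [pvPiece i] else v) acc.2 i))
        (([], []) : List (List Char) × List (List Char)) := by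
      apply PySem.List.foldl_congr_mem
      intro acc i _
      by_cases hc : PySem.Int.mod (i - st) 2 = 0
      · rw [if_pos hc]
        have hm : (i - st) % 2 = 0 := by
          rw [← PySem.Int.mod_eq_emod_of_pos (a := i - st) (b := 2) (by norm_num)]
          exact hc
        simp [hm]
      · rw [if_neg hc]
        have hm : (i - st) % 2 = 1 := by
          have h2 := PySem.Int.mod_eq_emod_of_pos (a := i - st) (b := 2) (by norm_num)
          rw [h2] at hc
          omega
        simp [hm]

    rw [hstep]
    rw [PySem.List.foldl_prod_mk (f := fun (u : List (List Char)) i => if decide (PySem.Int.mod (i - st) 2 = 0) then u ++ [pvPiece i] else u) (g := fun (v : List (List Char)) i => if ! decide (PySem.Int.mod (i - st) 2 = 0) then v ++ [pvPiece i] else v)]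
    rw [PySem.List.foldl_append_if, PySem.List.foldl_append_if]
    rw [hsplit.1, hsplit.2]
    simp
  rw [hB]
  rw [pvSideA _, pvSideA _]
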